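-- pv_equiv track=rewrite | github.com/vikasjangidmk/GMI-TASK | extract_ocr.py | cluster_list
-- ===== SOURCE A (Python) =====
-- def cluster_list(xs, tolerance=0):
--     if tolerance == 0 or len(xs) < 2:
--         return [[x] for x in sorted(xs)]
--     groups, current_group = [], [xs[0]]
--     for x in xs[1:]:
--         if x <= current_group[-1] + tolerance:
--             current_group.append(x)
--         else:
--             groups.append(current_group)
--             current_group = [x]
--     groups.append(current_group)
--     return groups
-- ===== SOURCE B (Python) =====
-- def cluster_list(xs, tolerance=0):
--     if tolerance == 0 or len(xs) < 2:
--         return [[x] for x in sorted(xs)]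
--     breaks = [i for i, (a, b) in enumerate(zip(xs, xs[1:]), 1) if b - a > tolerance]
--     bounds = [0] + breaks + [len(xs)]
--     return [xs[s:e] for s, e in zip(bounds, bounds[1:])]
-- ===== Notes on version B (the rewrite author's own statement) =====
-- stated objective: alternative
-- what changed: Replaces the incremental append-or-flush accumulator loop with a two-phase decomposition: first compute the break positions (indices where the gap to the previous element exceeds the tolerance), then build the groups by slicing xs between consecutive boundaries.
import Mathlib
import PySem

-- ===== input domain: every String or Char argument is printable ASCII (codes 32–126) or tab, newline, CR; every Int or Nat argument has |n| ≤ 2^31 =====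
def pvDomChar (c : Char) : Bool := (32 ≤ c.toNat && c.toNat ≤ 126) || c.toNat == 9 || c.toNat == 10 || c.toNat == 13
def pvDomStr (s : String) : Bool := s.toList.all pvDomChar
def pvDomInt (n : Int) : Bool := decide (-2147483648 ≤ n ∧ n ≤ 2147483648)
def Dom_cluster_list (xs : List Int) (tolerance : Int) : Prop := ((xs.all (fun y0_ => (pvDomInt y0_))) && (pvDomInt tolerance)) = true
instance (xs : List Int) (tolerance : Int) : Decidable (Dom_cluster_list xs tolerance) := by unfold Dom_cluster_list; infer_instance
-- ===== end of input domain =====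

-- B replaces A's append-or-flush accumulator loop by a break-index pass followed by a
-- slicing pass between consecutive boundaries (alternative decomposition, same cost).

-- ===== PORT A =====
def cluster_list (xs : List Int) (tolerance : Int) : List (List Int) :=
  if tolerance = 0 ∨ xs.length < 2 then
    (PySem.List.sorted xs (fun x => x) false).map (fun x => [x])
  else
    match xs with
    | [] => []  -- unreachable: the guard catches len(xs) < 2
    | x0 :: rest =>
      -- groups, current_group = [], [xs[0]]; for x in xs[1:]: …
      let st := rest.foldl
        (fun (st : List (List Int) × List Int) x =>
          -- current_group[-1]: the current group is never empty
          if x ≤ st.2.getLast?.getD 0 + tolerance then (st.1, st.2 ++ [x])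
          else (st.1 ++ [st.2], [x]))
        ([], [x0])
      st.1 ++ [st.2]

-- ===== PORT B =====
def cluster_list_alt (xs : List Int) (tolerance : Int) : List (List Int) :=
  if tolerance = 0 ∨ xs.length < 2 then
    (PySem.List.sorted xs (fun x => x) false).map (fun x => [x])
  else
    -- breaks = [i for i, (a, b) in enumerate(zip(xs, xs[1:]), 1) if b - a > tolerance]
    let breaks := ((PySem.List.enumerate (xs.zip xs.tail) 1).filter
        (fun p => decide (p.2.2 - p.2.1 > tolerance))).map (fun p => p.1)
    -- bounds = [0] + breaks + [len(xs)]
    let bounds := 0 :: (breaks ++ [(xs.length : Int)])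
    -- [xs[s:e] for s, e in zip(bounds, bounds[1:])]
    (bounds.zip bounds.tail).map (fun p => PySem.List.slice xs (some p.1) (some p.2))

-- ===== PRECONDITION & SPEC =====
def Spec_cluster_list (xs : List Int) (tolerance : Int) (out : List (List Int)) : Prop := out = cluster_list_alt xs tolerance
instance (xs : List Int) (tolerance : Int) (out : List (List Int)) : Decidable (Spec_cluster_list xs tolerance out) := by unfold Spec_cluster_list; infer_instance

-- ===== CLAIM (what is proved, stated in full; the proofs are below) =====
def Claim_equal_cluster_list : Prop := ∀ (xs : List Int) (tolerance : Int), Dom_cluster_list xs tolerance → Spec_cluster_list xs tolerance (cluster_list xs tolerance)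

-- ===== LEMMAS AND PROOFS =====

-- Common recursive characterisation of the non-guard path: groups of c :: ys,
-- splitting after each adjacent pair with gap > tol.
def grp (tol : Int) : Int → List Int → List (List Int)
  | c, [] => [[c]]
  | c, y :: ys =>
    if y ≤ c + tol then
      match grp tol y ys with
      | [] => []
      | g :: gs => (c :: g) :: gs
    else [c] :: grp tol y ys

theorem grp_shape (tol : Int) : ∀ (ys : List Int) (c : Int),
    ∃ t gs, grp tol c ys = (c :: t) :: gs := by
  intro ys
  induction ys with
  | nil => intro c; exact ⟨[], [], rfl⟩
  | cons y t ih =>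
    intro c
    obtain ⟨t', gs', h⟩ := ih y
    by_cases hc : y ≤ c + tol
    · exact ⟨y :: t', gs', by simp [grp, hc, h]⟩
    · exact ⟨[], (y :: t') :: gs', by simp [grp, hc, h]⟩

-- ---------- A side: the fold equals grp ----------

def finishA (tol : Int) : List (List Int) → List Int → List Int → List (List Int)
  | groups, cur, [] => groups ++ [cur]
  | groups, cur, y :: ys =>
    if y ≤ cur.getLast?.getD 0 + tol then finishA tol groups (cur ++ [y]) ys
    else finishA tol (groups ++ [cur]) [y] ys

theorem foldA_eq_finish (tol : Int) : ∀ (ys : List Int) (groups : List (List Int)) (cur : List Int),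
    ((ys.foldl
        (fun (st : List (List Int) × List Int) x =>
          if x ≤ st.2.getLast?.getD 0 + tol then (st.1, st.2 ++ [x])
          else (st.1 ++ [st.2], [x])) (groups, cur)).1
      ++ [(ys.foldl
        (fun (st : List (List Int) × List Int) x =>
          if x ≤ st.2.getLast?.getD 0 + tol then (st.1, st.2 ++ [x])
          else (st.1 ++ [st.2], [x])) (groups, cur)).2]) = finishA tol groups cur ys := by
  intro ys
  induction ys with
  | nil => intro groups cur; rfl
  | cons y t ih =>
    intro groups cur
    by_cases h : y ≤ cur.getLast?.getD 0 + tol <;>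
      simp only [List.foldl_cons, finishA, h, if_true, if_false] <;>
      exact ih _ _

theorem finish_eq_grp (tol : Int) : ∀ (ys pre : List Int) (c : Int) (groups : List (List Int))
    (g : List Int) (gs : List (List Int)), grp tol c ys = g :: gs →
    finishA tol groups (pre ++ [c]) ys = groups ++ (pre ++ g) :: gs := by
  intro ys
  induction ys with
  | nil =>
    intro pre c groups g gs h
    simp only [grp, List.cons.injEq] at h
    obtain ⟨h1, h2⟩ := h
    simp [finishA, ← h1, ← h2]
  | cons y t ih =>
    intro pre c groups g gs h
    obtain ⟨t', gs', hg⟩ := grp_shape tol t y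
    by_cases hc : y ≤ c + tol
    · simp only [grp, hc, if_true, hg, List.cons.injEq] at h
      have step : finishA tol groups (pre ++ [c]) (y :: t)
          = finishA tol groups ((pre ++ [c]) ++ [y]) t := by
        simp [finishA, hc]
      rw [step, ih (pre ++ [c]) y groups _ _ hg, ← h.1, ← h.2]
      simp
    · simp only [grp, hc, if_false, hg, List.cons.injEq] at h
      have step : finishA tol groups (pre ++ [c]) (y :: t)
          = finishA tol (groups ++ [pre ++ [c]]) ([] ++ [y]) t := by
        simp [finishA, hc]
      rw [step, ih [] y (groups ++ [pre ++ [c]]) _ _ hg, ← h.1, ← h.2]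
      simp

-- ---------- B side: breaks-and-slices equals grp ----------

def natBreaks (tol : Int) : List Int → List Nat
  | a :: b :: t => (if b - a > tol then [1] else []) ++ (natBreaks tol (b :: t)).map (· + 1)
  | _ => []

theorem enumerate_shift {α : Type} : ∀ (l : List α) (s : Int),
    PySem.List.enumerate l (s + 1) = (PySem.List.enumerate l s).map (fun p => (p.1 + 1, p.2)) := by
  intro l
  induction l with
  | nil => intro s; simp [PySem.List.enumerate_nil]
  | cons x t ih =>
    intro s
    simp only [PySem.List.enumerate_cons, List.map_cons]
    exact congrArg _ (ih (s + 1))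

theorem breaks_eq_natBreaks (tol : Int) : ∀ (xs : List Int),
    ((PySem.List.enumerate (xs.zip xs.tail) 1).filter
        (fun p => decide (p.2.2 - p.2.1 > tol))).map (fun p => p.1)
      = (natBreaks tol xs).map Int.ofNat := by
  intro xs
  match xs with
  | [] => simp [natBreaks, PySem.List.enumerate_nil]
  | [a] => simp [natBreaks, PySem.List.enumerate_nil]
  | a :: b :: t =>
    have ih := breaks_eq_natBreaks tol (b :: t)
    simp only [List.tail_cons, List.zip_cons_cons, PySem.List.enumerate_cons] at ih ⊢
    rw [enumerate_shift, List.filter_cons, List.filter_map]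
    have hcomp : ((fun (p : Int × Int × Int) => decide (p.2.2 - p.2.1 > tol)) ∘ (fun p => (p.1 + 1, p.2)))
        = (fun (p : Int × Int × Int) => decide (p.2.2 - p.2.1 > tol)) := rfl
    rw [hcomp]
    have h1 : ((fun (p : Int × Int × Int) => p.1) ∘ fun p => (p.1 + 1, p.2))
        = ((fun (x : Int) => x + 1) ∘ (fun (p : Int × Int × Int) => p.1)) := rfl
    have h2 : ∀ nb : List Nat, nb.map (Int.ofNat ∘ (· + 1)) = (nb.map Int.ofNat).map (· + 1) := by
      intro nb
      rw [List.map_map]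
      refine List.map_congr_left ?_
      intro k _
      simp [Function.comp]
    by_cases hb : b - a > tol
    · simp only [natBreaks, hb, decide_true, if_true, List.map_cons, List.map_map,
        List.cons_append, List.nil_append]
      refine congrArg _ ?_
      rw [h1, ← List.map_map, ih, h2]
    · simp only [natBreaks, hb, decide_false, Bool.false_eq_true, if_false, List.map_map,
        List.nil_append]
      rw [h1, ← List.map_map, ih, h2]

theorem zip_tail_map {α β : Type} (f : α → β) (u : List α) :
    (u.map f).zip (u.map f).tail = (u.zip u.tail).map (Prod.map f f) := by
  cases u with
  | nil => rfl
  | cons x t =>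
    show ((x :: t).map f).zip (t.map f) = ((x :: t).zip t).map (Prod.map f f)
    exact List.zip_map

theorem map_slice_shift (c : Int) (ys : List Int) (l : List (Nat × Nat)) :
    (l.map (Prod.map (· + 1) (· + 1))).map
        (fun p => ((c :: ys).drop p.1).take (p.2 - p.1))
      = l.map (fun p => (ys.drop p.1).take (p.2 - p.1)) := by
  rw [List.map_map]
  refine List.map_congr_left ?_
  intro p _
  simp [Prod.map, Nat.succ_sub_succ]

def sliceAll (tol : Int) (xs : List Int) : List (List Int) :=
  let nb := (0 : Nat) :: (natBreaks tol xs ++ [xs.length])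
  (nb.zip nb.tail).map (fun p => (xs.drop p.1).take (p.2 - p.1))

theorem pairs_succ (m : Nat) (L2 : List Nat) :
    (((0:Nat) :: (m :: L2).map (· + 1)).zip ((m :: L2).map (· + 1)))
      = (0, m + 1) :: (((m :: L2).zip L2).map (Prod.map (· + 1) (· + 1))) := by
  rw [List.map_cons, List.zip_cons_cons]
  congr 1
  exact zip_tail_map (· + 1) (m :: L2)

theorem sliceAll_eq_grp (tol : Int) : ∀ (ys : List Int) (c : Int),
    sliceAll tol (c :: ys) = grp tol c ys := by
  intro ys
  induction ys with
  | nil => intro c; rfl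
  | cons y t ih =>
    intro c
    obtain ⟨m, L2, hL⟩ : ∃ m L2, natBreaks tol (y :: t) ++ [(y :: t).length] = m :: L2 :=
      List.exists_cons_of_ne_nil (by simp)
    have hbounds : natBreaks tol (c :: y :: t) ++ [(c :: y :: t).length]
        = (if y - c > tol then [1] else [])
          ++ ((natBreaks tol (y :: t) ++ [(y :: t).length]).map (· + 1)) := by
      show (if y - c > tol then [1] else []) ++ (natBreaks tol (y :: t)).map (· + 1)
            ++ [(y :: t).length + 1]
          = (if y - c > tol then [1] else [])
            ++ ((natBreaks tol (y :: t) ++ [(y :: t).length]).map (· + 1))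
      simp
    have hIH : sliceAll tol (y :: t)
        = List.map (fun p => ((y :: t).drop p.1).take (p.2 - p.1))
            (((0:Nat) :: m :: L2).zip (m :: L2)) := by
      show List.map (fun p => ((y :: t).drop p.1).take (p.2 - p.1))
            (((0:Nat) :: (natBreaks tol (y :: t) ++ [(y :: t).length])).zip
              (natBreaks tol (y :: t) ++ [(y :: t).length]))
          = _
      rw [hL]
    by_cases hb : y - c > tol
    · have hc : ¬ y ≤ c + tol := by omega
      show List.map (fun p => ((c :: y :: t).drop p.1).take (p.2 - p.1))
            (((0:Nat) :: (natBreaks tol (c :: y :: t) ++ [(c :: y :: t).length])).zip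
              (natBreaks tol (c :: y :: t) ++ [(c :: y :: t).length]))
          = grp tol c (y :: t)
      rw [hbounds, if_pos hb, hL]
      have h01 : ([1] ++ ((m :: L2).map (· + 1)) : List Nat)
          = ((0 :: m :: L2).map (· + 1)) := by simp
      rw [h01, pairs_succ 0 (m :: L2), List.map_cons, map_slice_shift c (y :: t)]
      rw [← hIH, ih y]
      simp [grp, hc]
    · have hc : y ≤ c + tol := by omega
      obtain ⟨t2, gs2, hgrp⟩ := grp_shape tol t y
      show List.map (fun p => ((c :: y :: t).drop p.1).take (p.2 - p.1))
            (((0:Nat) :: (natBreaks tol (c :: y :: t) ++ [(c :: y :: t).length])).zip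
              (natBreaks tol (c :: y :: t) ++ [(c :: y :: t).length]))
          = grp tol c (y :: t)
      rw [hbounds, if_neg hb, List.nil_append, hL]
      rw [pairs_succ m L2, List.map_cons, map_slice_shift c (y :: t)]
      have hsplit : sliceAll tol (y :: t)
          = ((y :: t).take m)
            :: List.map (fun p => ((y :: t).drop p.1).take (p.2 - p.1)) ((m :: L2).zip L2) := by
        rw [hIH, List.zip_cons_cons, List.map_cons]
        rfl
      have h2 := hsplit.symm.trans (ih y) |>.trans hgrp
      obtain ⟨hhead, htail⟩ := List.cons_eq_cons.mp h2
      rw [htail]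
      have hfirst : ((c :: y :: t).drop (0, m + 1).1).take ((0, m + 1).2 - (0, m + 1).1)
          = c :: (y :: t).take m := by simp
      rw [hfirst, hhead]
      simp [grp, hc, hgrp]

-- B's else branch (verbatim) equals sliceAll (casting the Nat bounds to Int slices)
def altElse (tol : Int) (xs : List Int) : List (List Int) :=
  let breaks := ((PySem.List.enumerate (xs.zip xs.tail) 1).filter
      (fun p => decide (p.2.2 - p.2.1 > tol))).map (fun p => p.1)
  let bounds := 0 :: (breaks ++ [(xs.length : Int)])
  (bounds.zip bounds.tail).map (fun p => PySem.List.slice xs (some p.1) (some p.2))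

theorem altElse_eq_sliceAll (tol : Int) (xs : List Int) :
    altElse tol xs = sliceAll tol xs := by
  unfold altElse
  dsimp only
  rw [breaks_eq_natBreaks]
  have hb : (0 : Int) :: ((natBreaks tol xs).map Int.ofNat ++ [(xs.length : Int)])
      = (((0 : Nat) :: (natBreaks tol xs ++ [xs.length])).map Int.ofNat) := by
    simp
  rw [hb, zip_tail_map Int.ofNat, List.map_map]
  refine List.map_congr_left ?_
  intro p _
  show PySem.List.slice xs (some (Int.ofNat p.1)) (some (Int.ofNat p.2))
      = (xs.drop p.1).take (p.2 - p.1)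
  simpa using PySem.List.slice_natCast xs p.1 p.2

-- ===== VERDICT (by name: the statement is the Claim_ definition above) =====
theorem cluster_list_spec : Claim_equal_cluster_list := by
  intro xs tol _
  show cluster_list xs tol = cluster_list_alt xs tol
  unfold cluster_list cluster_list_alt
  by_cases hguard : tol = 0 ∨ xs.length < 2
  · rw [if_pos hguard, if_pos hguard]
  · rw [if_neg hguard, if_neg hguard]
    cases xs with
    | nil => exact absurd (Or.inr (by simp)) hguard
    | cons x0 rest =>
      obtain ⟨t', gs', hg⟩ := grp_shape tol rest x0
      have hA : ((rest.foldl
          (fun (st : List (List Int) × List Int) x =>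
            if x ≤ st.2.getLast?.getD 0 + tol then (st.1, st.2 ++ [x])
            else (st.1 ++ [st.2], [x])) ([], [x0])).1
          ++ [(rest.foldl
          (fun (st : List (List Int) × List Int) x =>
            if x ≤ st.2.getLast?.getD 0 + tol then (st.1, st.2 ++ [x])
            else (st.1 ++ [st.2], [x])) ([], [x0])).2]) = grp tol x0 rest := by
        rw [foldA_eq_finish tol rest [] [x0]]
        have := finish_eq_grp tol rest [] x0 [] _ _ hg
        simpa [hg] using this
      have hB : altElse tol (x0 :: rest) = grp tol x0 rest :=
        (altElse_eq_sliceAll tol (x0 :: rest)).trans (sliceAll_eq_grp tol rest x0)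
      exact hA.trans hB.symm
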